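-- pv_equiv track=rewrite | github.com/linnil1/KIR_graph | kg_msa_leftalign.py | findDeletePos
-- ===== SOURCE A (Python) =====
-- def findDeletePos(seq):
--     pos = 0
--     length = 0
--     for i in range(len(seq)):
--         if seq[i] == "-":
--             length += 1
--         else:
--             yield pos, length
--             pos = i + 1
--             length = 0
--     if length:
--         yield pos, length
-- ===== SOURCE B (Python) =====
-- def findDeletePos(seq):
--     # Build the non-gap index list once, then emit one pair per consecutive
--     # index pair plus an optional trailing run.
--     idx = [-1] + [i for i, c in enumerate(seq) if c != "-"]
--     for prev, cur in zip(idx, idx[1:]):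
--         yield prev + 1, cur - prev - 1
--     trailing = len(seq) - idx[-1] - 1
--     if trailing:
--         yield idx[-1] + 1, trailing
-- ===== Notes on version B (the rewrite author's own statement) =====
-- stated objective: alternative
-- what changed: Replaces A's running (pos,length) state machine over each character with building the non-gap position index list (with a -1 sentinel) once, then emitting one pair per consecutive index pair plus an optional trailing run.
import Mathlib
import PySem

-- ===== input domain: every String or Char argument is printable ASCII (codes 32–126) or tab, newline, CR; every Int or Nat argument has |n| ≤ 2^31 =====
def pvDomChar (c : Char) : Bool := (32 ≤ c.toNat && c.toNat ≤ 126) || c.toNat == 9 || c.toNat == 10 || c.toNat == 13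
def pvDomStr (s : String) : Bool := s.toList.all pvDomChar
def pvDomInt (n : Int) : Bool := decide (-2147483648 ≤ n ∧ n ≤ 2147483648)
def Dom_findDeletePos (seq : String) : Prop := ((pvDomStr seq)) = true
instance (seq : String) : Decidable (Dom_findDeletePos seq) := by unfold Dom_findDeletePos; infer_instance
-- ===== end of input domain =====

-- B replaces A's running (pos, length) state machine by building the non-gap index
-- list once and mapping over consecutive index pairs (objective: alternative).

-- ===== PORT A =====
-- A's "for i in range(len(seq))" reading seq[i] in order: structural recursion over
-- the characters carrying the index i and A's (pos, length) state; the post-loop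
-- "if length: yield" is the base case.
def pvLoopA : List Char → Int → Int → Int → List (Int × Int) → List (Int × Int)
  | [], _, pos, length, acc => if length ≠ 0 then acc ++ [(pos, length)] else acc
  | c :: rest, i, pos, length, acc =>
      if c == '-' then pvLoopA rest (i + 1) pos (length + 1) acc
      else pvLoopA rest (i + 1) (i + 1) 0 (acc ++ [(pos, length)])

def findDeletePos (seq : String) : List (Int × Int) :=
  pvLoopA seq.toList 0 0 0 []

-- ===== PORT B =====
def findDeletePos_alt (seq : String) : List (Int × Int) :=
  let cs := seq.toList
  let idx : List Int :=
    (-1) :: (PySem.List.enumerate cs).filterMap (fun p => if p.2 ≠ '-' then some p.1 else none)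
  let pairs := (idx.zip idx.tail).map (fun p => (p.1 + 1, p.2 - p.1 - 1))
  let last := idx.getLastD 0     -- idx is nonempty (head -1), so the default is never used
  let trailing := (cs.length : Int) - last - 1
  if trailing ≠ 0 then pairs ++ [(last + 1, trailing)] else pairs

-- ===== PRECONDITION & SPEC =====
def Spec_findDeletePos (seq : String) (out : List (Int × Int)) : Prop := out = findDeletePos_alt seq
instance (seq : String) (out : List (Int × Int)) : Decidable (Spec_findDeletePos seq out) := by unfold Spec_findDeletePos; infer_instance

-- ===== CLAIM (what is proved, stated in full; the proofs are below) =====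
def Claim_equal_findDeletePos : Prop := ∀ (seq : String), Dom_findDeletePos seq → Spec_findDeletePos seq (findDeletePos seq)

-- ===== LEMMAS AND PROOFS =====

-- A's loop from state (i, i - length, length): the future output as a function of
-- the remaining characters only.
def pvRunsFrom : List Char → Int → Int → List (Int × Int)
  | [], i, length => if length ≠ 0 then [(i - length, length)] else []
  | c :: rest, i, length =>
      if c == '-' then pvRunsFrom rest (i + 1) (length + 1)
      else (i - length, length) :: pvRunsFrom rest (i + 1) 0

-- B's tail after sentinel p, given remaining non-gap indices L and total length n.
def pvBuildB : Int → List Int → Int → List (Int × Int)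
  | p, [], n => if n - p - 1 ≠ 0 then [(p + 1, n - p - 1)] else []
  | p, c :: L, n => (p + 1, c - p - 1) :: pvBuildB c L n

def pvNongap (cs : List Char) (i : Int) : List Int :=
  (PySem.List.enumerate cs i).filterMap (fun p => if p.2 ≠ '-' then some p.1 else none)

theorem pvLoopA_eq_runs (cs : List Char) :
    ∀ (i length : Int) (acc : List (Int × Int)),
      pvLoopA cs i (i - length) length acc = acc ++ pvRunsFrom cs i length := by
  induction cs with
  | nil => intro i length acc; simp [pvLoopA, pvRunsFrom]; split <;> simp
  | cons c rest ih =>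
    intro i length acc
    simp only [pvLoopA, pvRunsFrom]
    by_cases h : c == '-'
    · simp only [h, if_pos]
      have := ih (i + 1) (length + 1) acc
      rw [show i + 1 - (length + 1) = i - length by ring] at this
      exact this
    · simp only [h]
      have := ih (i + 1) 0 (acc ++ [(i - length, length)])
      rw [show i + 1 - 0 = i + 1 by ring] at this
      simp only [Bool.false_eq_true, if_false] at *
      rw [this, List.append_assoc]
      rfl

theorem pvRuns_eq_build (cs : List Char) :
    ∀ (i length : Int),
      pvRunsFrom cs i length = pvBuildB (i - length - 1) (pvNongap cs i) (i + cs.length) := by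
  induction cs with
  | nil =>
    intro i length
    simp only [pvRunsFrom, pvNongap, PySem.List.enumerate_nil, List.filterMap_nil, pvBuildB,
      List.length_nil, Int.natCast_zero, add_zero]
    rw [show i - (i - length - 1) - 1 = length from by ring,
        show i - length - 1 + 1 = i - length from by ring]
  | cons c rest ih =>
    intro i length
    simp only [pvRunsFrom, pvNongap, PySem.List.enumerate_cons, List.filterMap_cons]
    by_cases h : c == '-'
    · have hc : ¬ c ≠ '-' := by simpa using h
      simp only [h, if_pos, hc, ite_false]
      rw [ih (i + 1) (length + 1),
          show i + 1 - (length + 1) - 1 = i - length - 1 from by ring,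
          show i + ((c :: rest).length : Int) = i + 1 + rest.length from by simp [List.length_cons]; ring]
      rfl
    · have hc : c ≠ '-' := by simpa using h
      simp only [h, Bool.false_eq_true, if_false, hc, ne_eq, not_false_iff, ite_true]
      rw [ih (i + 1) 0, pvBuildB,
          show i - length - 1 + 1 = i - length from by ring,
          show i - (i - length - 1) - 1 = length from by ring,
          show i + 1 - 0 - 1 = i from by ring,
          show i + ((c :: rest).length : Int) = i + 1 + rest.length from by simp [List.length_cons]; ring]
      rfl

theorem pvZip_eq_build (L : List Int) :
    ∀ (p n : Int),
      ((((p :: L).zip L).map (fun q => (q.1 + 1, q.2 - q.1 - 1))) ++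
        (if n - (p :: L).getLastD 0 - 1 ≠ 0 then
          [((p :: L).getLastD 0 + 1, n - (p :: L).getLastD 0 - 1)] else [])) =
      pvBuildB p L n := by
  induction L with
  | nil => intro p n; simp [pvBuildB]
  | cons c L ih =>
    intro p n
    simp only [List.zip_cons_cons, List.map_cons, List.cons_append, pvBuildB]
    rw [← ih c n]
    congr 1

theorem findDeletePos_eq (seq : String) : findDeletePos seq = findDeletePos_alt seq := by
  unfold findDeletePos findDeletePos_alt
  have h1 := pvLoopA_eq_runs seq.toList 0 0 []
  simp only [sub_zero, List.nil_append] at h1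
  rw [h1, pvRuns_eq_build seq.toList 0 0, show (0 : Int) - 0 - 1 = -1 by ring, zero_add]
  have h3 := pvZip_eq_build (pvNongap seq.toList 0) (-1) ((seq.toList.length : Int))
  rw [← h3]
  simp only [pvNongap, List.tail_cons]
  split <;> simp

-- ===== VERDICT (by name: the statement is the Claim_ definition above) =====
theorem findDeletePos_spec : Claim_equal_findDeletePos := by
  intro seq _
  unfold Spec_findDeletePos
  exact findDeletePos_eq seq
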